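-- pv_equiv track=rewrite | github.com/MorganCThomas/MolScore | molscore/scoring_functions/glide.py | modify_glide_in
-- ===== SOURCE A (Python) =====
-- def modify_glide_in(glide_in: str, glide_property: str, glide_value: str):
--     """
--     Convenience function to insert / overwrite certain .in file properties and values
--     :param glide_in: A string of the .in file
--     :param property: Property to be changed (e.g. POSE_OUTTYPE)
--     :param value: Value to change to (e.g. ligandlib_sd)
--     :return: Modified glide_in
--     """
--     # If property is already present, replace value
--     if any([True if glide_property in line else False for line in glide_in]):
--         for i in range(len(glide_in)):
--             if glide_property in glide_in[i]:
--                 glide_in[i] = f'{glide_property}   {glide_value}\n'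
--                 break
--     # Otherwise insert it before newline (separates properties from features)
--     elif any([True if line == '\n' else False for line in glide_in]):
--         for i in range(len(glide_in)):
--             if glide_in[i] == '\n':
--                 glide_in.insert(i, f'{glide_property}   {glide_value}\n')
--                 break
--     # Otherwise just stick it on the end of the file
--     else:
--         glide_in.append(f'{glide_property}   {glide_value}\n')
--
--     return glide_in
-- ===== SOURCE B (Python) =====
-- def modify_glide_in(glide_in: str, glide_property: str, glide_value: str):
--     new_line = f'{glide_property}   {glide_value}\n'
--     # Candidate placement events: (is_blank_event, index). Property lines get
--     # flag False, blank lines flag True, so the lexicographic minimum is the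
--     # first property line if any, else the first blank line.
--     candidates = [(glide_property not in line, i)
--                   for i, line in enumerate(glide_in)
--                   if glide_property in line or line == '\n']
--     if candidates:
--         is_blank, i = min(candidates)
--         if is_blank:
--             glide_in.insert(i, new_line)
--         else:
--             glide_in[i] = new_line
--     else:
--         glide_in.append(new_line)
--     return glide_in
-- ===== Notes on version B (the rewrite author's own statement) =====
-- stated objective: alternative
-- what changed: Instead of A's branch-per-case scanning (two any() pre-checks each followed by its own break loop), B builds one comprehension of candidate placement events as (is_blank, index) pairs, selects the winning event with a single lexicographic min (property events sort before blank events), and applies one overwrite/insert/append action.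
import Mathlib
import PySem

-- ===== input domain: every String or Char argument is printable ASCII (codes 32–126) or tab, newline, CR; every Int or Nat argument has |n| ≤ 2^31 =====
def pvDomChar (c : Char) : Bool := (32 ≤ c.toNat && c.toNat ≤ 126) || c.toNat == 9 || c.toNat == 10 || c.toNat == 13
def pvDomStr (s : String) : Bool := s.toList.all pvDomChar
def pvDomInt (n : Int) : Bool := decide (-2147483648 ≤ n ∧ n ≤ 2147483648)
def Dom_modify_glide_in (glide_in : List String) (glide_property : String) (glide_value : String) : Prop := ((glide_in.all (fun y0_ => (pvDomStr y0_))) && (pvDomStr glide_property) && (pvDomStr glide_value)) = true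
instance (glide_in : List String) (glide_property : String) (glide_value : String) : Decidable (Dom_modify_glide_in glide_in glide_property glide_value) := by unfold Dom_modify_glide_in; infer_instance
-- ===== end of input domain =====

-- B replaces A's branch-per-case scanning (two any() pre-checks, each with its own
-- break loop) by one comprehension of (is_blank, index) candidate events, a single
-- lexicographic min, and one overwrite/insert/append action (objective: alternative).
-- Both Pythons mutate glide_in in place; the equivalence proved is about the return value.

-- ===== PORT A =====
-- 'for i in range(len): if gp in gi[i]: gi[i] = fmt; break' as structural recursion
def aReplaceFirst (gp fmt : String) : List String → List String
  | [] => []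
  | l :: rest => if PySem.Str.isIn gp l then fmt :: rest else l :: aReplaceFirst gp fmt rest

-- 'for i in range(len): if gi[i] == "\n": gi.insert(i, fmt); break' as structural recursion
def aInsertFirst (fmt : String) : List String → List String
  | [] => []
  | l :: rest => if l == "\n" then fmt :: l :: rest else l :: aInsertFirst fmt rest

def modify_glide_in (glide_in : List String) (glide_property : String) (glide_value : String) : List String :=
  let fmt := glide_property ++ "   " ++ glide_value ++ "\n"
  if glide_in.any (fun line => PySem.Str.isIn glide_property line) then
    aReplaceFirst glide_property fmt glide_in
  else if glide_in.any (fun line => line == "\n") then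
    aInsertFirst fmt glide_in
  else
    glide_in ++ [fmt]

-- ===== PORT B =====
-- the comprehension's filter ('gp in line or line == "\n"') and element ('(gp not in line, i)')
def candf (gp : String) (p : Int × String) : Option (Bool × Int) :=
  if PySem.Str.isIn gp p.2 || p.2 == "\n" then some (!(PySem.Str.isIn gp p.2), p.1) else none

def modify_glide_in_alt (glide_in : List String) (glide_property : String) (glide_value : String) : List String :=
  let newLine := glide_property ++ "   " ++ glide_value ++ "\n"
  let candidates := (PySem.List.enumerate glide_in).filterMap (candf glide_property)
  match PySem.List.min2? candidates (fun p => p.1) (fun p => p.2) with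
  | some (true, i) => PySem.List.insert glide_in i newLine
  | some (false, i) => PySem.List.pySetD glide_in i newLine
  | none => glide_in ++ [newLine]

-- ===== PRECONDITION & SPEC =====
def Spec_modify_glide_in (glide_in : List String) (glide_property : String) (glide_value : String) (out : List String) : Prop := out = modify_glide_in_alt glide_in glide_property glide_value
instance (glide_in : List String) (glide_property : String) (glide_value : String) (out : List String) : Decidable (Spec_modify_glide_in glide_in glide_property glide_value out) := by unfold Spec_modify_glide_in; infer_instance

-- ===== CLAIM (what is proved, stated in full; the proofs are below) =====
def Claim_equal_modify_glide_in : Prop := ∀ (glide_in : List String) (glide_property : String) (glide_value : String), Dom_modify_glide_in glide_in glide_property glide_value → Spec_modify_glide_in glide_in glide_property glide_value (modify_glide_in glide_in glide_property glide_value)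

-- ===== LEMMAS AND PROOFS =====
-- the fold step of PySem.List.min2? with the pair projections as keys
def mstep (m? : Option (Bool × Int)) (x : Bool × Int) : Option (Bool × Int) :=
  match m? with
  | none => some x
  | some m => if (decide (x.1 < m.1) || !decide (m.1 < x.1) && decide (x.2 < m.2)) = true then some x else some m

theorem min2?_eq_foldl (l : List (Bool × Int)) :
    PySem.List.min2? l (fun p => p.1) (fun p => p.2) = l.foldl mstep none := by
  unfold PySem.List.min2?
  refine PySem.List.foldl_congr_mem _ _ _ _ ?_
  intro acc x _
  cases acc <;> rfl

-- once the accumulator is a property event (flag false) at index i below every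
-- remaining candidate index, the fold is frozen
theorem foldl_frozen_false (gp : String) (xs : List String) (s i : Int) (h : i < s) :
    ((PySem.List.enumerate xs s).filterMap (candf gp)).foldl mstep (some (false, i))
      = some (false, i) := by
  induction xs generalizing s i with
  | nil => simp [PySem.List.enumerate_nil]
  | cons l rest ih =>
    rw [PySem.List.enumerate_cons, List.filterMap_cons]
    have hns : ¬ (s < i) := by omega
    by_cases hc : (PySem.Str.isIn gp l || l == "\n") = true
    · have hcl : candf gp (s, l) = some (!(PySem.Str.isIn gp l), s) := by
        simp only [candf]; rw [if_pos hc]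
      simp only [hcl, List.foldl_cons]
      have hstep : mstep (some (false, i)) (!(PySem.Str.isIn gp l), s) = some (false, i) := by
        cases PySem.Str.isIn gp l <;> simp [mstep, hns]
      rw [hstep]
      exact ih (s + 1) i (by omega)
    · have hcl : candf gp (s, l) = none := by
        simp only [candf]; rw [if_neg hc]
      simp only [hcl]
      exact ih (s + 1) i (by omega)

-- with a blank event (flag true) accumulated, the fold returns the first
-- property event of the rest, else keeps the accumulator
theorem foldl_acc_true (gp : String) (xs : List String) (s i : Int) (h : i < s) :
    ((PySem.List.enumerate xs s).filterMap (candf gp)).foldl mstep (some (true, i))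
      = (match xs.findIdx? (fun l => PySem.Str.isIn gp l) with
         | some j => some (false, s + (j : Int))
         | none => some (true, i)) := by
  induction xs generalizing s i with
  | nil => simp [PySem.List.enumerate_nil]
  | cons l rest ih =>
    rw [PySem.List.enumerate_cons, List.filterMap_cons]
    have hns : ¬ (s < i) := by omega
    by_cases hp : PySem.Str.isIn gp l = true
    · have hpC : PySem.Chars.isIn gp.toList l.toList = true := by simpa using hp
      have hcl : candf gp (s, l) = some (false, s) := by simp [candf, hpC]
      simp only [hcl, List.foldl_cons]
      have hstep : mstep (some (true, i)) (false, s) = some (false, s) := by simp [mstep]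
      rw [hstep, foldl_frozen_false gp rest (s + 1) s (by omega)]
      simp [List.findIdx?_cons, hpC]
    · have hp'C : PySem.Chars.isIn gp.toList l.toList = false := by simpa using hp
      by_cases hb : (l == "\n") = true
      · have hbE : l = "\n" := by simpa using hb
        have hpN : PySem.Chars.isIn gp.toList ['\n'] = false := by simpa [hbE] using hp
        have hcl : candf gp (s, l) = some (true, s) := by simp [candf, hbE, hpN]
        simp only [hcl, List.foldl_cons]
        have hstep : mstep (some (true, i)) (true, s) = some (true, i) := by simp [mstep, hns]
        rw [hstep, ih (s + 1) i (by omega)]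
        cases hfi : rest.findIdx? (fun l => PySem.Chars.isIn gp.toList l.toList) with
        | none => simp [List.findIdx?_cons, hbE, hpN, hfi]
        | some j =>
          simp [List.findIdx?_cons, hbE, hpN, hfi]
          omega
      · have hb'E : ¬ l = "\n" := by simpa using hb
        have hcl : candf gp (s, l) = none := by simp [candf, hp'C, hb'E]
        simp only [hcl]
        rw [ih (s + 1) i (by omega)]
        cases hfi : rest.findIdx? (fun l => PySem.Chars.isIn gp.toList l.toList) with
        | none => simp [List.findIdx?_cons, hp'C, hfi]
        | some j =>
          simp [List.findIdx?_cons, hp'C, hfi]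
          omega

-- full characterisation of B's lexicographic minimum over the candidate events
theorem min2?_cand (gp : String) (xs : List String) (s : Int) :
    PySem.List.min2? ((PySem.List.enumerate xs s).filterMap (candf gp)) (fun p => p.1) (fun p => p.2)
      = (match xs.findIdx? (fun l => PySem.Str.isIn gp l) with
         | some j => some (false, s + (j : Int))
         | none =>
           match xs.findIdx? (fun l => l == "\n") with
           | some j => some (true, s + (j : Int))
           | none => none) := by
  rw [min2?_eq_foldl]
  induction xs generalizing s with
  | nil => simp [PySem.List.enumerate_nil]
  | cons l rest ih =>
    rw [PySem.List.enumerate_cons, List.filterMap_cons]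
    by_cases hp : PySem.Str.isIn gp l = true
    · have hpC : PySem.Chars.isIn gp.toList l.toList = true := by simpa using hp
      have hcl : candf gp (s, l) = some (false, s) := by simp [candf, hpC]
      simp only [hcl, List.foldl_cons]
      have h0 : mstep none (false, s) = some (false, s) := rfl
      rw [h0, foldl_frozen_false gp rest (s + 1) s (by omega)]
      simp [List.findIdx?_cons, hpC]
    · have hp'C : PySem.Chars.isIn gp.toList l.toList = false := by simpa using hp
      by_cases hb : (l == "\n") = true
      · have hbE : l = "\n" := by simpa using hb
        have hpN : PySem.Chars.isIn gp.toList ['\n'] = false := by simpa [hbE] using hp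
        have hcl : candf gp (s, l) = some (true, s) := by simp [candf, hbE, hpN]
        simp only [hcl, List.foldl_cons]
        have h0 : mstep none (true, s) = some (true, s) := rfl
        rw [h0, foldl_acc_true gp rest (s + 1) s (by omega)]
        cases hfi : rest.findIdx? (fun l => PySem.Chars.isIn gp.toList l.toList) with
        | none => simp [List.findIdx?_cons, hbE, hpN, hfi]
        | some j =>
          simp [List.findIdx?_cons, hbE, hpN, hfi]
          omega
      · have hb'E : ¬ l = "\n" := by simpa using hb
        have hcl : candf gp (s, l) = none := by simp [candf, hp'C, hb'E]
        simp only [hcl]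
        rw [ih (s + 1)]
        cases hfi : rest.findIdx? (fun l => PySem.Chars.isIn gp.toList l.toList) with
        | some j =>
          simp [List.findIdx?_cons, hp'C, hfi]
          omega
        | none =>
          cases hfb : rest.findIdx? (fun l => l == "\n") with
          | some j =>
            simp [List.findIdx?_cons, hp'C, hb'E, hfi, hfb]
            omega
          | none => simp [List.findIdx?_cons, hp'C, hb'E, hfi, hfb]

-- A's replace loop = set at the first matching index
theorem aReplaceFirst_eq (gp fmt : String) (xs : List String) (j : Nat)
    (h : xs.findIdx? (fun l => PySem.Str.isIn gp l) = some j) :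
    aReplaceFirst gp fmt xs = xs.set j fmt := by
  induction xs generalizing j with
  | nil => simp at h
  | cons l rest ih =>
    rw [List.findIdx?_cons] at h
    by_cases hl : PySem.Str.isIn gp l = true
    · have hlC : PySem.Chars.isIn gp.toList l.toList = true := by simpa using hl
      simp [hlC] at h
      subst h
      simp [aReplaceFirst, hlC]
    · have hlC : PySem.Chars.isIn gp.toList l.toList = false := by simpa using hl
      rw [if_neg (by simpa using hl)] at h
      simp only [Option.map_eq_some_iff] at h
      obtain ⟨j', hj', rfl⟩ := h
      simp [aReplaceFirst, hlC, ih j' hj']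

-- A's insert loop = insert before the first blank index
theorem aInsertFirst_eq (fmt : String) (xs : List String) (j : Nat)
    (h : xs.findIdx? (fun l => l == "\n") = some j) :
    aInsertFirst fmt xs = xs.take j ++ fmt :: xs.drop j := by
  induction xs generalizing j with
  | nil => simp at h
  | cons l rest ih =>
    rw [List.findIdx?_cons] at h
    by_cases hl : (l == "\n") = true
    · simp [hl] at h
      subst h
      simp [aInsertFirst, hl]
    · have hl' : (l == "\n") = false := by simpa using hl
      simp only [hl', Bool.false_eq_true, if_false, Option.map_eq_some_iff] at h
      obtain ⟨j', hj', rfl⟩ := h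
      simp [aInsertFirst, hl', ih j' hj']

theorem findIdx?_le_length {α : Type} (p : α → Bool) (xs : List α) (j : Nat)
    (h : xs.findIdx? p = some j) : j ≤ xs.length := by
  have := List.findIdx?_eq_some_iff_findIdx_eq.mp h
  omega

-- ===== VERDICT (by name: the statement is the Claim_ definition above) =====
theorem modify_glide_in_spec : Claim_equal_modify_glide_in := by
  intro glide_in glide_property glide_value _
  unfold Spec_modify_glide_in
  simp only [modify_glide_in, modify_glide_in_alt]
  rw [min2?_cand glide_property glide_in 0]
  by_cases hp : glide_in.any (fun line => PySem.Str.isIn glide_property line) = true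
  · obtain ⟨j, hj⟩ : ∃ j, glide_in.findIdx? (fun l => PySem.Str.isIn glide_property l) = some j := by
      rcases hfi : glide_in.findIdx? (fun l => PySem.Str.isIn glide_property l) with _ | j
      · rw [List.findIdx?_eq_none_iff] at hfi
        rw [List.any_eq_true] at hp
        obtain ⟨x, hx, hpx⟩ := hp
        rw [hfi x hx] at hpx
        exact absurd hpx (by simp)
      · exact ⟨j, rfl⟩
    rw [hj, if_pos hp]
    show aReplaceFirst glide_property _ glide_in = PySem.List.pySetD glide_in (0 + (j : Int)) _
    rw [zero_add, PySem.List.pySetD_natCast]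
    exact aReplaceFirst_eq _ _ _ _ hj
  · have hfi : glide_in.findIdx? (fun l => PySem.Str.isIn glide_property l) = none := by
      rw [List.findIdx?_eq_none_iff]
      intro x hx
      rw [Bool.not_eq_true] at hp
      rw [List.any_eq_false] at hp
      simpa using hp x hx
    rw [hfi, if_neg hp]
    by_cases hb : glide_in.any (fun line => line == "\n") = true
    · obtain ⟨j, hj⟩ : ∃ j, glide_in.findIdx? (fun l => l == "\n") = some j := by
        rcases hfb : glide_in.findIdx? (fun l => l == "\n") with _ | j
        · rw [List.findIdx?_eq_none_iff] at hfb
          rw [List.any_eq_true] at hb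
          obtain ⟨x, hx, hbx⟩ := hb
          rw [hfb x hx] at hbx
          exact absurd hbx (by simp)
        · exact ⟨j, rfl⟩
      rw [hj, if_pos hb]
      show aInsertFirst _ glide_in = PySem.List.insert glide_in (0 + (j : Int)) _
      rw [zero_add]
      exact (aInsertFirst_eq _ _ _ hj).trans
        (PySem.List.insert_natCast _ _ _ (findIdx?_le_length _ _ _ hj)).symm
    · have hfb : glide_in.findIdx? (fun l => l == "\n") = none := by
        rw [List.findIdx?_eq_none_iff]
        intro x hx
        rw [Bool.not_eq_true] at hb
        rw [List.any_eq_false] at hb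
        simpa using hb x hx
      rw [hfb, if_neg hb]
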